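-- pv_equiv track=rewrite | github.com/karthiks360/Python_Tutorials | progs/List/positiveinrange.py | posinrange
-- ===== SOURCE A (Python) =====
-- def posinrange(n1,n2):
--     res = []
--     i = n1
--     for i in range(n1,n2):
--         if i > 0:
--             res.append(i)
--         i += 1
--     return res
-- ===== SOURCE B (Python) =====
-- def posinrange(n1, n2):
--     return list(range(max(n1, 1), n2))
-- ===== Notes on version B (the rewrite author's own statement) =====
-- stated objective: simpler
-- what changed: B replaces the per-element positivity filter loop with an analytic lower bound: start = max(n1, 1), then a single range materialization.
import Mathlib
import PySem

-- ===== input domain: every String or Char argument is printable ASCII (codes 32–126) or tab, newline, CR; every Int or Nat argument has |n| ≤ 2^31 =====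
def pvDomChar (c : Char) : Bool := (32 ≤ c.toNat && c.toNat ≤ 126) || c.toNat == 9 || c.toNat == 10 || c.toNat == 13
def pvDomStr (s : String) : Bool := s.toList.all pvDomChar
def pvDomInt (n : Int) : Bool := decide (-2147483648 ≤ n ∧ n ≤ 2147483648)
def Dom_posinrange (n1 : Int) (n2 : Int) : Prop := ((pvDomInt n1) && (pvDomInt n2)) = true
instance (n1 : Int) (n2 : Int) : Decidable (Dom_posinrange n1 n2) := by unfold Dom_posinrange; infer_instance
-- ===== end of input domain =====

-- B builds the result in one shot from the analytic lower bound max(n1,1); A filters each element of range(n1,n2) in a loop. Equal output, simpler code.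

-- ===== PORT A =====
-- loop 'for i in range(n1,n2): if i > 0: res.append(i)' as a foldl; the dead 'i += 1' does not affect res
def posinrange (n1 : Int) (n2 : Int) : List Int :=
  (PySem.List.pyRange n1 n2 1).foldl (fun res i => if i > 0 then res ++ [i] else res) []

-- ===== PORT B =====
def posinrange_alt (n1 : Int) (n2 : Int) : List Int :=
  PySem.List.pyRange (max n1 1) n2 1

-- ===== PRECONDITION & SPEC =====
def Spec_posinrange (n1 : Int) (n2 : Int) (out : List Int) : Prop := out = posinrange_alt n1 n2
instance (n1 : Int) (n2 : Int) (out : List Int) : Decidable (Spec_posinrange n1 n2 out) := by unfold Spec_posinrange; infer_instance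

-- ===== CLAIM (what is proved, stated in full; the proofs are below) =====
def Claim_equal_posinrange : Prop := ∀ (n1 : Int) (n2 : Int), Dom_posinrange n1 n2 → Spec_posinrange n1 n2 (posinrange n1 n2)

-- ===== LEMMAS AND PROOFS =====

-- loop invariant: filtering positives from range(a,b) onto res yields res ++ range(max a 1, b)
lemma posinrange_loop (n : Nat) : ∀ (a b : Int) (res : List Int), (b - a).toNat = n →
    (PySem.List.pyRange a b 1).foldl (fun res i => if i > 0 then res ++ [i] else res) res
      = res ++ PySem.List.pyRange (max a 1) b 1 := by
  induction n with
  | zero =>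
    intro a b res h
    have hba : b ≤ a := by omega
    rw [PySem.List.pyRange_one_eq_nil hba,
        PySem.List.pyRange_one_eq_nil (by omega : b ≤ max a 1)]
    simp
  | succ k ih =>
    intro a b res h
    have hab : a < b := by omega
    rw [PySem.List.pyRange_one_cons hab]
    simp only [List.foldl_cons]
    rw [ih (a + 1) b _ (by omega)]
    by_cases ha : a > 0
    · have h1 : max a 1 = a := by omega
      have h2 : max (a + 1) 1 = a + 1 := by omega
      rw [if_pos ha, h1, h2, PySem.List.pyRange_one_cons hab]
      simp
    · have h1 : max a 1 = 1 := by omega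
      have h2 : max (a + 1) 1 = 1 := by omega
      rw [if_neg ha, h1, h2]

-- ===== VERDICT (by name: the statement is the Claim_ definition above) =====
theorem posinrange_spec : Claim_equal_posinrange := by
  intro n1 n2 _
  show posinrange n1 n2 = posinrange_alt n1 n2
  unfold posinrange posinrange_alt
  rw [posinrange_loop (n2 - n1).toNat n1 n2 [] rfl]
  simp
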